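-- pv_equiv track=rewrite | github.com/dmille56/drawiterm | src/drawiterm/painter.py | _get_bg_positions
-- ===== SOURCE A (Python) =====
-- _bg_pos_cache: dict[tuple[int, int, int, int], list[tuple[int, int]]] = {}
--
-- def _get_bg_positions(
--     col_offset: int, row_offset: int, width: int, height: int
-- ) -> list[tuple[int, int]]:
--     key = (col_offset % 5, row_offset % 5, width, height)
--     cached = _bg_pos_cache.get(key)
--     if cached is not None:
--         return cached
--     positions = [
--         (tc, tr)
--         for tr in range(height)
--         for tc in range(width)
--         if (tc + col_offset) % 5 == 0 and (tr + row_offset) % 5 == 0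
--     ]
--     _bg_pos_cache[key] = positions
--     return positions
-- ===== SOURCE B (Python) =====
-- _bg_pos_cache: dict[tuple[int, int, int, int], list[tuple[int, int]]] = {}
--
-- def _get_bg_positions(
--     col_offset: int, row_offset: int, width: int, height: int
-- ) -> list[tuple[int, int]]:
--     key = (col_offset % 5, row_offset % 5, width, height)
--     cached = _bg_pos_cache.get(key)
--     if cached is not None:
--         return cached
--     # jump straight to the matching coordinates on each axis, stride 5
--     cols = range((-col_offset) % 5, width, 5)
--     rows = range((-row_offset) % 5, height, 5)
--     positions = [(tc, tr) for tr in rows for tc in cols]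
--     _bg_pos_cache[key] = positions
--     return positions
-- ===== Notes on version B (the rewrite author's own statement) =====
-- stated objective: faster
-- what changed: Instead of scanning every (tc,tr) grid cell and testing both mod-5 conditions, B computes the first matching index on each axis with one modulo and strides by 5 (range(start, stop, 5)), then takes the Cartesian product in the same row-outer/column-inner order.
import Mathlib
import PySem

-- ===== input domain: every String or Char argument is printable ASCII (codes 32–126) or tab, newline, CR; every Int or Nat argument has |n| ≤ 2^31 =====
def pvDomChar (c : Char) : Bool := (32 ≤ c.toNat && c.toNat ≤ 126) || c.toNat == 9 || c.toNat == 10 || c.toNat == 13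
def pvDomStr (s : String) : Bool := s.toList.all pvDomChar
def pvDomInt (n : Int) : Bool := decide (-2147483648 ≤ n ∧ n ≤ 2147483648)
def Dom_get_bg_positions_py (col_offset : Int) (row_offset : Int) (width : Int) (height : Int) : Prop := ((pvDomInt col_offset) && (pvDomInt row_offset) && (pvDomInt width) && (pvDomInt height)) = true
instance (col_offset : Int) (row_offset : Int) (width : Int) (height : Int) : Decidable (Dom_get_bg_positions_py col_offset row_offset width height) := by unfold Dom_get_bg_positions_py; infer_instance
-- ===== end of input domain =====

-- B replaces A's full-grid scan (mod test on every cell) with stride-5 ranges per axis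
-- and their Cartesian product (objective: faster, constant factor). Both Pythons use a
-- module-level memo cache; equivalence here is about the returned value, which the cache
-- (keyed by offsets mod 5) never changes, so the ports compute the uncached value.

-- ===== PORT A =====
def get_bg_positions_py (col_offset : Int) (row_offset : Int) (width : Int) (height : Int) : List (Int × Int) :=
  (PySem.List.pyRange 0 height 1).flatMap (fun tr =>
    (PySem.List.pyRange 0 width 1).flatMap (fun tc =>
      if PySem.Int.mod (tc + col_offset) 5 = 0 ∧ PySem.Int.mod (tr + row_offset) 5 = 0
      then [(tc, tr)] else []))

-- ===== PORT B =====
def get_bg_positions_py_alt (col_offset : Int) (row_offset : Int) (width : Int) (height : Int) : List (Int × Int) :=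
  let cols := PySem.List.pyRange (PySem.Int.mod (-col_offset) 5) width 5
  let rows := PySem.List.pyRange (PySem.Int.mod (-row_offset) 5) height 5
  rows.flatMap (fun tr => cols.map (fun tc => (tc, tr)))

-- ===== PRECONDITION & SPEC =====
def Spec_get_bg_positions_py (col_offset : Int) (row_offset : Int) (width : Int) (height : Int) (out : List (Int × Int)) : Prop := out = get_bg_positions_py_alt col_offset row_offset width height
instance (col_offset : Int) (row_offset : Int) (width : Int) (height : Int) (out : List (Int × Int)) : Decidable (Spec_get_bg_positions_py col_offset row_offset width height out) := by unfold Spec_get_bg_positions_py; infer_instance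

-- ===== CLAIM (what is proved, stated in full; the proofs are below) =====
def Claim_equal_get_bg_positions_py : Prop := ∀ (col_offset : Int) (row_offset : Int) (width : Int) (height : Int), Dom_get_bg_positions_py col_offset row_offset width height → Spec_get_bg_positions_py col_offset row_offset width height (get_bg_positions_py col_offset row_offset width height)

-- ===== LEMMAS AND PROOFS =====

-- flatMap with a guarded body is a flatMap over the filtered list
theorem pv_flatMap_if {α β : Type} (l : List α) (p : α → Prop) [DecidablePred p] (g : α → List β) :
    l.flatMap (fun x => if p x then g x else []) = (l.filter (fun x => decide (p x))).flatMap g := by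
  induction l with
  | nil => rfl
  | cons a t ih => by_cases h : p a <;> simp [h, ih]

-- the stride lemma: filtering range(n) by "(t+off) % 5 == 0" is range((-off)%5, n, 5)
theorem pv_stride (off n : Int) :
    (PySem.List.pyRange 0 n 1).filter (fun t => decide (PySem.Int.mod (t + off) 5 = 0))
      = PySem.List.pyRange (PySem.Int.mod (-off) 5) n 5 := by
  set s : Int := PySem.Int.mod (-off) 5 with hs
  have hs0 : 0 ≤ s := PySem.Int.mod_nonneg _ (by norm_num)
  have hs5 : s < 5 := PySem.Int.mod_lt _ (by norm_num)
  have hdvd : (5:Int) ∣ (-off - s) :=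
    ⟨PySem.Int.floordiv (-off) 5, by
      have := PySem.Int.floordiv_mul_add_mod (-off) 5
      rw [← hs] at this; linarith⟩
  have hp1 : (PySem.List.pyRange 0 n 1).filter
      (fun t => decide (PySem.Int.mod (t + off) 5 = 0)) |>.Pairwise (· < ·) :=
    (PySem.List.pairwise_lt_pyRange_one 0 n).filter _
  have hp2 : (PySem.List.pyRange s n 5).Pairwise (· < ·) := by
    rw [PySem.List.pyRange_of_pos s n (by norm_num)]
    exact List.pairwise_lt_range.map _ (fun a b h => by omega)
  have hmem : ∀ x, x ∈ (PySem.List.pyRange 0 n 1).filter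
      (fun t => decide (PySem.Int.mod (t + off) 5 = 0)) ↔ x ∈ PySem.List.pyRange s n 5 := by
    intro x
    rw [List.mem_filter, PySem.List.mem_pyRange_iff_of_pos (show (0:Int) < 5 by norm_num),
        PySem.List.mem_pyRange_one]
    simp only [decide_eq_true_eq, PySem.Int.mod_eq_zero_iff_dvd]
    omega
  have hperm := (List.perm_ext_iff_of_nodup
      (hp1.imp fun h => ne_of_lt h) (hp2.imp fun h => ne_of_lt h)).2 hmem
  exact hperm.eq_of_pairwise (fun a b _ _ h1 h2 => absurd h2 (lt_asymm h1)) hp1 hp2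

theorem get_bg_positions_py_eq (col_offset row_offset width height : Int) :
    get_bg_positions_py col_offset row_offset width height
      = get_bg_positions_py_alt col_offset row_offset width height := by
  unfold get_bg_positions_py get_bg_positions_py_alt
  have hinner : ∀ tr : Int,
      (PySem.List.pyRange 0 width 1).flatMap (fun tc =>
        if PySem.Int.mod (tc + col_offset) 5 = 0 ∧ PySem.Int.mod (tr + row_offset) 5 = 0
        then [(tc, tr)] else [])
      = if PySem.Int.mod (tr + row_offset) 5 = 0
        then (PySem.List.pyRange (PySem.Int.mod (-col_offset) 5) width 5).map (fun tc => (tc, tr))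
        else ([] : List (Int × Int)) := by
    intro tr
    by_cases h : PySem.Int.mod (tr + row_offset) 5 = 0
    · simp only [h, and_true, if_pos]
      rw [pv_flatMap_if (PySem.List.pyRange 0 width 1)
            (fun tc => PySem.Int.mod (tc + col_offset) 5 = 0) (fun tc => [(tc, tr)]),
          pv_stride col_offset width]
      induction (PySem.List.pyRange (PySem.Int.mod (-col_offset) 5) width 5) with
      | nil => rfl
      | cons a t ih => simp [ih]
    · rw [PySem.Int.mod_eq_zero_iff_dvd] at h
      simp [h]
  simp only [hinner]
  rw [pv_flatMap_if (PySem.List.pyRange 0 height 1)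
        (fun tr => PySem.Int.mod (tr + row_offset) 5 = 0)
        (fun tr => (PySem.List.pyRange (PySem.Int.mod (-col_offset) 5) width 5).map (fun tc => (tc, tr))),
      pv_stride row_offset height]

-- ===== VERDICT (by name: the statement is the Claim_ definition above) =====
theorem get_bg_positions_py_spec : Claim_equal_get_bg_positions_py := by
  intro co ro w h _
  unfold Spec_get_bg_positions_py
  exact get_bg_positions_py_eq co ro w h
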